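-- pv_equiv track=rewrite | github.com/coda-nsit/leetcode | 890.py | reduceWords
-- ===== SOURCE A (Python) =====
-- def reduceWords(words):
--     reducedWords = []
--     for word in words:
--         sortedWord = word
--         mappedWord = {}
--         currOffset = -1
--         reducedWord = []
--         for c in sortedWord:
--             if c not in mappedWord:
--                 currOffset += 1
--                 mappedWord[c] = chr(ord("a") + currOffset)
--             reducedWord.append(mappedWord[c])
--         reducedWords.append("".join(reducedWord))
--     return reducedWords
-- ===== SOURCE B (Python) =====
-- def _canon(word):
--     chars = list(word)
--     return "".join(chr(ord("a") + len(set(chars[:chars.index(c)]))) for c in chars)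
--
--
-- def reduceWords(words):
--     return [_canon(word) for word in words]
-- ===== Notes on version B (the rewrite author's own statement) =====
-- stated objective: alternative
-- what changed: B keeps no incremental mapping at all: each output letter is computed independently by a positional formula - the rank of a character is the number of distinct characters in the prefix before its first occurrence (chars[:chars.index(c)]), so A's stateful dict/offset loop disappears in favour of a per-character index+set computation; it trades A's linear pass for a quadratic but stateless one.
import Mathlib
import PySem

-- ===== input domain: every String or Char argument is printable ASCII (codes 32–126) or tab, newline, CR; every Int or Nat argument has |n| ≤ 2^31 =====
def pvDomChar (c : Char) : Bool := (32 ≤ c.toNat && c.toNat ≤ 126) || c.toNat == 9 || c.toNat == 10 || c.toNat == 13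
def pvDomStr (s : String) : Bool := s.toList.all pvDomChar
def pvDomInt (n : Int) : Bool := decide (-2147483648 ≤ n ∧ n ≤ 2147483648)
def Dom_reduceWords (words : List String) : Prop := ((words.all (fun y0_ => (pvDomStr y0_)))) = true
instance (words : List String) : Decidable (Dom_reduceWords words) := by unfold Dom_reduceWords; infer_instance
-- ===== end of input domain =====

-- B keeps no incremental mapping state at all: each output letter is computed independently as
-- 'a' + (number of distinct characters before this character's first occurrence); objective:
-- alternative (stateless positional formula instead of A's fused dict/offset loop; not faster).

-- ===== PORT A =====
-- one inner-loop step of A: the dict `mappedWord`, `currOffset`, and `reducedWord` as the state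
-- (the lookup `mappedWord[c]` is ported as `getD c c`: the key is always present at that point)
def stepA (st : PySem.Dict Char Char × Int × List Char) (c : Char) :
    PySem.Dict Char Char × Int × List Char :=
  let st' := if st.1.contains c then st
    else (st.1.insert c (Char.ofNat (97 + (st.2.1 + 1)).toNat), st.2.1 + 1, st.2.2)
  (st'.1, st'.2.1, st'.2.2 ++ [st'.1.getD c c])

def reduceWordA (w : List Char) : List Char :=
  (w.foldl stepA (PySem.Dict.empty, -1, [])).2.2

def reduceWords (words : List String) : List String :=
  words.foldl (fun acc w => acc ++ [String.ofList (reduceWordA w.toList)]) []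

-- ===== PORT B =====
-- chr(ord("a") + len(set(chars[:chars.index(c)]))): `chars.index(c)` always succeeds since c ∈ chars,
-- ported as `(index? …).getD 0`; the slice and set are the PySem primitives
def canonB (w : List Char) : List Char :=
  w.map (fun c =>
    let k := (PySem.List.index? w c).getD 0
    Char.ofNat (97 + (PySem.Set.len (PySem.Set.ofList (PySem.List.slice w none (some (k : Int)))))).toNat)

def reduceWords_alt (words : List String) : List String :=
  words.map (fun w => String.ofList (canonB w.toList))

-- ===== PRECONDITION & SPEC =====
def Spec_reduceWords (words : List String) (out : List String) : Prop := out = reduceWords_alt words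
instance (words : List String) (out : List String) : Decidable (Spec_reduceWords words out) := by unfold Spec_reduceWords; infer_instance

-- ===== CLAIM (what is proved, stated in full; the proofs are below) =====
def Claim_equal_reduceWords : Prop := ∀ (words : List String), Dom_reduceWords words → Spec_reduceWords words (reduceWords words)

-- ===== LEMMAS AND PROOFS =====

-- Set.update only ever appends
lemma set_update_append (l : List Char) : ∀ (s : PySem.Set Char), ∃ t, PySem.Set.update s l = s ++ t := by
  induction l with
  | nil => exact fun s => ⟨[], by simp [PySem.Set.update]⟩
  | cons c l ih =>
    intro s
    have h1 : PySem.Set.update s (c :: l) = PySem.Set.update (PySem.Set.add s c) l := rfl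
    rcases ih (PySem.Set.add s c) with ⟨t, ht⟩
    by_cases hc : c ∈ s
    · have ha : PySem.Set.add s c = s := by simp [PySem.Set.add, PySem.Set.contains, hc]
      exact ⟨t, by rw [h1, ht, ha]⟩
    · have ha : PySem.Set.add s c = s ++ [c] := by simp [PySem.Set.add, PySem.Set.contains, hc]
      exact ⟨c :: t, by rw [h1, ht, ha]; simp⟩

lemma idxOf_update_of_mem {fs : List Char} {c : Char} (h : c ∈ fs) (l : List Char) :
    (PySem.Set.update fs l).idxOf c = fs.idxOf c := by
  rcases set_update_append l fs with ⟨t, ht⟩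
  rw [ht, List.idxOf_append_of_mem h]

-- B's positional formula: the distinct chars of the prefix before c's first occurrence count c's rank
lemma rank_eq {w : List Char} {c : Char} (hc : c ∈ w) :
    (PySem.Set.ofList (w.take (w.idxOf c))).length = (PySem.List.dedup w).idxOf c := by
  obtain ⟨k, hk⟩ := Option.isSome_iff_exists.mp ((PySem.List.index?_isSome_iff w c).mpr hc)
  obtain ⟨pre, suf, hw, hlen, hpre⟩ := (PySem.List.index?_eq_some_iff w c k).mp hk
  have hio : w.idxOf? c = some k := by rw [← PySem.List.index?_eq_idxOf?]; exact hk
  have hidx : w.idxOf c = k := by simp [List.idxOf_eq_getD_idxOf?, hio]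
  subst hw
  have htake : (pre ++ c :: suf).take pre.length = pre := List.take_left
  have hnm : c ∉ PySem.Set.ofList pre := by
    rw [PySem.Set.mem_ofList]; exact hpre
  have h1 : PySem.List.dedup (pre ++ c :: suf)
      = PySem.Set.update (PySem.Set.add (PySem.Set.ofList pre) c) suf := by
    rw [PySem.List.dedup_eq_ofList, PySem.Set.ofList_eq_foldl, List.foldl_append]
    rfl
  have h2 : PySem.Set.add (PySem.Set.ofList pre) c = PySem.Set.ofList pre ++ [c] := by
    simp [PySem.Set.add, PySem.Set.contains, hnm]
  rw [hidx, ← hlen, htake, h1, h2,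
    idxOf_update_of_mem (by simp : c ∈ PySem.Set.ofList pre ++ [c]) suf]
  simp [List.idxOf_append, hnm]

-- invariant of A's inner loop: positions map to the rank of their char among the distinct chars seen
lemma stepA_inv (cs : List Char) : ∀ (fs : List Char) (m : PySem.Dict Char Char) (acc : List Char),
    fs.Nodup →
    (∀ c, m.contains c = decide (c ∈ fs)) →
    (∀ c ∈ fs, m.get? c = some (Char.ofNat (97 + ((fs.idxOf c : Nat) : Int)).toNat)) →
    (cs.foldl stepA (m, ((fs.length : Nat) : Int) - 1, acc)).2.2
      = acc ++ cs.map (fun c => Char.ofNat (97 + (((PySem.Set.update fs cs).idxOf c : Nat) : Int)).toNat) := by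
  induction cs with
  | nil => intro fs m acc _ _ _; simp
  | cons c cs ih =>
    intro fs m acc hnd hcont hget
    by_cases hc : c ∈ fs
    · have hcon : m.contains c = true := by rw [hcont]; simpa
      have hstep : stepA (m, ((fs.length : Nat) : Int) - 1, acc) c
          = (m, ((fs.length : Nat) : Int) - 1, acc ++ [m.getD c c]) := by
        simp [stepA, hcon]
      have hupd : PySem.Set.update fs (c :: cs) = PySem.Set.update fs cs := by
        show PySem.Set.update (PySem.Set.add fs c) cs = _
        simp [PySem.Set.add, PySem.Set.contains, hc]
      have hval : m.getD c c = Char.ofNat (97 + ((fs.idxOf c : Nat) : Int)).toNat :=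
        PySem.Dict.getD_of_get?_eq_some _ c (hget c hc)
      rw [List.foldl_cons, hstep, ih fs m _ hnd hcont hget, hupd, List.map_cons, hval,
        idxOf_update_of_mem hc]
      simp
    · have hcon : m.contains c = false := by rw [hcont]; simpa
      have hadd : PySem.Set.add fs c = fs ++ [c] := by
        simp [PySem.Set.add, PySem.Set.contains, hc]
      have hv : Char.ofNat (97 + (((fs.length : Nat) : Int) - 1 + 1)).toNat
          = Char.ofNat (97 + ((fs.length : Nat) : Int)).toNat := by norm_num
      have hstep : stepA (m, ((fs.length : Nat) : Int) - 1, acc) c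
          = (m.insert c (Char.ofNat (97 + ((fs.length : Nat) : Int)).toNat),
             ((fs.length : Nat) : Int) - 1 + 1,
             acc ++ [(m.insert c (Char.ofNat (97 + ((fs.length : Nat) : Int)).toNat)).getD c c]) := by
        simp only [stepA, hcon, Bool.false_eq_true, if_false, hv]
      have hnd' : (fs ++ [c]).Nodup := by
        rw [List.nodup_append]
        refine ⟨hnd, List.nodup_singleton c, ?_⟩
        intro a ha b hb h
        have hbc : b = c := List.mem_singleton.mp hb
        exact hc (hbc ▸ h ▸ ha)
      have hcont' : ∀ c', (m.insert c (Char.ofNat (97 + ((fs.length : Nat) : Int)).toNat)).contains c'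
          = decide (c' ∈ fs ++ [c]) := by
        intro c'
        rw [PySem.Dict.contains_insert, hcont c']
        by_cases h' : c' = c <;> simp [h']
      have hidxc : (fs ++ [c]).idxOf c = fs.length := by simp [List.idxOf_append, hc]
      have hget' : ∀ c' ∈ fs ++ [c], (m.insert c (Char.ofNat (97 + ((fs.length : Nat) : Int)).toNat)).get? c'
          = some (Char.ofNat (97 + (((fs ++ [c]).idxOf c' : Nat) : Int)).toNat) := by
        intro c' hc'
        by_cases h' : c' = c
        · subst h'
          rw [PySem.Dict.get?_insert_self, hidxc]
        · have hmem : c' ∈ fs := by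
            rcases List.mem_append.mp hc' with h | h
            · exact h
            · exact absurd (List.mem_singleton.mp h) h'
          rw [PySem.Dict.get?_insert_of_ne m _ h', List.idxOf_append_of_mem hmem]
          exact hget c' hmem
      have hoff : ((fs.length : Nat) : Int) - 1 + 1 = (((fs ++ [c]).length : Nat) : Int) - 1 := by
        simp
      have hupd : PySem.Set.update fs (c :: cs) = PySem.Set.update (fs ++ [c]) cs := by
        show PySem.Set.update (PySem.Set.add fs c) cs = _
        rw [hadd]
      have hval : (m.insert c (Char.ofNat (97 + ((fs.length : Nat) : Int)).toNat)).getD c c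
          = Char.ofNat (97 + ((fs.length : Nat) : Int)).toNat :=
        PySem.Dict.getD_insert_self _ _ _ _
      have hcmem : c ∈ fs ++ [c] := by simp
      rw [List.foldl_cons, hstep, hoff, ih (fs ++ [c]) _ _ hnd' hcont' hget', hupd,
        List.map_cons, hval, idxOf_update_of_mem hcmem cs, hidxc]
      simp

-- per word, A's fused loop equals B's positional formula
lemma word_eq (w : List Char) : reduceWordA w = canonB w := by
  have hA := stepA_inv w [] PySem.Dict.empty []
    List.nodup_nil
    (fun c => by simp [PySem.Dict.contains_empty])
    (fun c hc => absurd hc (List.not_mem_nil))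
  have hupd : PySem.Set.update [] w = PySem.List.dedup w := by
    simp [PySem.List.dedup_eq_ofList, PySem.Set.ofList_eq_foldl, PySem.Set.update]
  unfold reduceWordA canonB
  simp only [List.length_nil, Nat.cast_zero] at hA
  norm_num at hA
  rw [hA, hupd]
  simp only []
  apply List.map_congr_left
  intro c hc
  have hidx : (PySem.List.index? w c).getD 0 = w.idxOf c := by
    obtain ⟨k, hk⟩ := Option.isSome_iff_exists.mp ((PySem.List.index?_isSome_iff w c).mpr hc)
    have hio : w.idxOf? c = some k := by rw [← PySem.List.index?_eq_idxOf?]; exact hk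
    simp [List.idxOf_eq_getD_idxOf?, hio]
  rw [hidx, PySem.List.slice_to_natCast]
  have hlen : PySem.Set.len (PySem.Set.ofList (w.take (w.idxOf c)))
      = ((PySem.Set.ofList (w.take (w.idxOf c))).length : Int) := by
    simp [PySem.Set.len]
  rw [hlen, rank_eq hc]

-- ===== VERDICT (by name: the statement is the Claim_ definition above) =====
theorem reduceWords_spec : Claim_equal_reduceWords := by
  intro words _
  unfold Spec_reduceWords reduceWords reduceWords_alt
  rw [PySem.List.foldl_append_singleton_eq_map]
  simp only [List.nil_append]
  exact List.map_congr_left (fun w _ => by rw [word_eq])
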